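-- pv_equiv track=rewrite | github.com/IamWilliamWang/Leetcode-practice | 2020.4/MaxRepetitions.py | getLongstrLoopLeastTimesToContainsShortstr
-- ===== SOURCE A (Python) =====
-- def getLongstrLoopLeastTimesToContainsShortstr(longStr: str, shortStr: str, timesMaxLimit=0):
--     index = -1
--     ans = 1
--     for shortCh in shortStr:
--         if 0 < timesMaxLimit <= ans:
--             break
--         foundIndex = (longStr * 2).find(shortCh, index + 1)
--         if foundIndex == -1:
--             return -1
--         if foundIndex >= len(longStr):
--             index = foundIndex - len(longStr)
--             ans += 1
--         else:
--             index = foundIndex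
--     return ans
-- ===== SOURCE B (Python) =====
-- def getLongstrLoopLeastTimesToContainsShortstr(longStr: str, shortStr: str, timesMaxLimit=0):
--     positions = {}
--     for i, ch in enumerate(longStr):
--         positions.setdefault(ch, []).append(i)
--     index = -1
--     ans = 1
--     for ch in shortStr:
--         if 0 < timesMaxLimit <= ans:
--             break
--         ps = positions.get(ch)
--         if ps is None:
--             return -1
--         lo, hi = 0, len(ps)
--         while lo < hi:
--             mid = (lo + hi) // 2
--             if ps[mid] > index:
--                 hi = mid
--             else:
--                 lo = mid + 1
--         if lo == len(ps):
--             index = ps[0]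
--             ans += 1
--         else:
--             index = ps[lo]
--     return ans
-- ===== Notes on version B (the rewrite author's own statement) =====
-- stated objective: faster
-- what changed: B builds a per-character sorted position index of longStr once and answers each shortStr character with a binary search over that character's positions, instead of A's per-character linear scan of a freshly rebuilt longStr*2.
import Mathlib
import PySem

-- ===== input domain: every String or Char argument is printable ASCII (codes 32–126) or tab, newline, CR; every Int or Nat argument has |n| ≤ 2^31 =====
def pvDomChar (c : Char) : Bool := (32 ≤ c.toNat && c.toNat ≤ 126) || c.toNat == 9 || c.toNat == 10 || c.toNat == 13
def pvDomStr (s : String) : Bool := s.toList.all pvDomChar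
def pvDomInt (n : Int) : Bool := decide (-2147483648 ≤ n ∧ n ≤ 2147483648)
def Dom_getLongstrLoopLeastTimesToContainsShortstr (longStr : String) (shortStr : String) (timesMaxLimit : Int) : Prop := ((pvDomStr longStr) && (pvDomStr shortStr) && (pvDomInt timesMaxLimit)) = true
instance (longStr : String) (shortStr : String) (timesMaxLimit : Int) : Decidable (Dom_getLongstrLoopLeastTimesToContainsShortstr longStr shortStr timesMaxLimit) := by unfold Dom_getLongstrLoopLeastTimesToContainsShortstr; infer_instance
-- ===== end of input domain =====

-- B replaces A's per-character linear scan of longStr*2 (rebuilt each step) by a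
-- one-pass per-char position index plus a hand-written binary search per character
-- of shortStr: an asymptotically faster exact re-implementation.

-- ===== PORT A =====
-- hand port of Python's str.find(ch, start) for a single character ch: first index
-- i ≥ start with s[i] = ch, else -1; exact here because the algorithm only calls it
-- with start = index+1 ≥ 0 (negative starts, which Python reads from the end, never occur).
def pvAFind (c : Char) (start : Int) : List Char → Int → Int
  | [], _ => -1
  | x :: xs, i => if start ≤ i ∧ x = c then i else pvAFind c start xs (i + 1)

def pvALoop (l : List Char) (t : Int) : List Char → Int → Int → Int
  | [], _, ans => ans
  | c :: rest, index, ans =>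
    if 0 < t ∧ t ≤ ans then ans
    else
      let foundIndex := pvAFind c (index + 1) (l ++ l) 0
      if foundIndex = -1 then -1
      else if (l.length : Int) ≤ foundIndex then pvALoop l t rest (foundIndex - l.length) (ans + 1)
      else pvALoop l t rest foundIndex ans

def getLongstrLoopLeastTimesToContainsShortstr (longStr : String) (shortStr : String) (timesMaxLimit : Int) : Int :=
  pvALoop longStr.toList timesMaxLimit shortStr.toList (-1) 1

-- ===== PORT B =====
-- positions.setdefault(ch, []).append(i) over enumerate(longStr)
def pvBuildPos : List Char → Int → PySem.Dict Char (List Int) → PySem.Dict Char (List Int)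
  | [], _, d => d
  | ch :: rest, i, d =>
    match d.get? ch with
    | some ps => pvBuildPos rest (i + 1) (d.insert ch (ps ++ [i]))
    | none => pvBuildPos rest (i + 1) (d.insert ch [i])

-- the hand-written while-loop binary search of Source B (ps[mid] is always in range;
-- .getD 0 only makes the lookup total)
def pvBisect (ps : List Int) (index : Int) (lo hi : Int) : Int :=
  if h : lo < hi then
    let mid := PySem.Int.floordiv (lo + hi) 2
    if index < (PySem.List.pyGet? ps mid).getD 0 then pvBisect ps index lo mid
    else pvBisect ps index (mid + 1) hi
  else lo
termination_by (hi - lo).toNat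
decreasing_by
  · have h2 : PySem.Int.floordiv (lo + hi) 2 = (lo + hi) / 2 :=
      PySem.Int.floordiv_eq_ediv_of_pos (by norm_num)
    simp only [h2]; omega
  · have h2 : PySem.Int.floordiv (lo + hi) 2 = (lo + hi) / 2 :=
      PySem.Int.floordiv_eq_ediv_of_pos (by norm_num)
    simp only [h2]; omega

def pvBLoop (d : PySem.Dict Char (List Int)) (t : Int) : List Char → Int → Int → Int
  | [], _, ans => ans
  | c :: rest, index, ans =>
    if 0 < t ∧ t ≤ ans then ans
    else
      match d.get? c with
      | none => -1
      | some ps =>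
        let lo := pvBisect ps index 0 ps.length
        if lo = (ps.length : Int) then
          pvBLoop d t rest ((PySem.List.pyGet? ps 0).getD 0) (ans + 1)
        else
          pvBLoop d t rest ((PySem.List.pyGet? ps lo).getD 0) ans

def getLongstrLoopLeastTimesToContainsShortstr_alt (longStr : String) (shortStr : String) (timesMaxLimit : Int) : Int :=
  pvBLoop (pvBuildPos longStr.toList 0 PySem.Dict.empty) timesMaxLimit shortStr.toList (-1) 1

-- ===== PRECONDITION & SPEC =====
def Spec_getLongstrLoopLeastTimesToContainsShortstr (longStr : String) (shortStr : String) (timesMaxLimit : Int) (out : Int) : Prop := out = getLongstrLoopLeastTimesToContainsShortstr_alt longStr shortStr timesMaxLimit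
instance (longStr : String) (shortStr : String) (timesMaxLimit : Int) (out : Int) : Decidable (Spec_getLongstrLoopLeastTimesToContainsShortstr longStr shortStr timesMaxLimit out) := by unfold Spec_getLongstrLoopLeastTimesToContainsShortstr; infer_instance

-- ===== CLAIM (what is proved, stated in full; the proofs are below) =====
def Claim_equal_getLongstrLoopLeastTimesToContainsShortstr : Prop := ∀ (longStr : String) (shortStr : String) (timesMaxLimit : Int), Dom_getLongstrLoopLeastTimesToContainsShortstr longStr shortStr timesMaxLimit → Spec_getLongstrLoopLeastTimesToContainsShortstr longStr shortStr timesMaxLimit (getLongstrLoopLeastTimesToContainsShortstr longStr shortStr timesMaxLimit)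

-- ===== LEMMAS AND PROOFS =====

-- positions of c in a list, with starting offset i
def pvOcc (c : Char) : List Char → Int → List Int
  | [], _ => []
  | x :: xs, i => if x = c then i :: pvOcc c xs (i + 1) else pvOcc c xs (i + 1)

theorem pvOcc_append (c : Char) (xs ys : List Char) (i : Int) :
    pvOcc c (xs ++ ys) i = pvOcc c xs i ++ pvOcc c ys (i + xs.length) := by
  induction xs generalizing i with
  | nil => simp [pvOcc]
  | cons x xs ih =>
    simp only [pvOcc, List.cons_append, List.length_cons, ih]
    have h1 : i + ((xs.length : Int) + 1) = i + 1 + xs.length := by ring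
    push_cast
    rw [h1]
    split <;> simp

theorem pvOcc_bounds (c : Char) (xs : List Char) (i : Int) :
    ∀ p ∈ pvOcc c xs i, i ≤ p ∧ p < i + xs.length := by
  induction xs generalizing i with
  | nil => simp [pvOcc]
  | cons x xs ih =>
    intro p hp
    simp only [pvOcc] at hp
    simp only [List.length_cons]
    push_cast
    split at hp
    · rw [List.mem_cons] at hp
      rcases hp with h | h
      · subst h; omega
      · have := ih (i + 1) p h; omega
    · have := ih (i + 1) p hp; omega

theorem pvOcc_sorted (c : Char) (xs : List Char) (i : Int) :
    (pvOcc c xs i).Pairwise (· < ·) := by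
  induction xs generalizing i with
  | nil => simp [pvOcc]
  | cons x xs ih =>
    simp only [pvOcc]
    split
    · refine List.Pairwise.cons ?_ (ih (i + 1))
      intro p hp; have := pvOcc_bounds c xs (i + 1) p hp; omega
    · exact ih (i + 1)

theorem pvOcc_shift (c : Char) (xs : List Char) (i j : Int) :
    pvOcc c xs (i + j) = (pvOcc c xs i).map (· + j) := by
  induction xs generalizing i with
  | nil => simp [pvOcc]
  | cons x xs ih =>
    simp only [pvOcc]
    have : i + j + 1 = (i + 1) + j := by ring
    split <;> simp [this, ih]

theorem pvAFind_eq (c : Char) (s : Int) (xs : List Char) (i : Int) :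
    pvAFind c s xs i = ((pvOcc c xs i).find? (fun p => decide (s ≤ p))).getD (-1) := by
  induction xs generalizing i with
  | nil => simp [pvAFind, pvOcc]
  | cons x xs ih =>
    simp only [pvAFind, pvOcc]
    by_cases hx : x = c
    · by_cases hs : s ≤ i
      · simp [hx, hs]
      · simp [hx, hs, ih]
    · simp [hx, ih]

-- find? with a predicate that every element satisfies returns head?
theorem find?_all {α : Type} (p : α → Bool) (xs : List α) (h : ∀ x ∈ xs, p x = true) :
    xs.find? p = xs.head? := by
  cases xs with
  | nil => rfl
  | cons x xs => simp [List.find?, h x (by simp)]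

-- find? returns the element at the first position satisfying the predicate
theorem find?_eq_getElem {α : Type} (p : α → Bool) (xs : List α) (r : Nat) (hr : r < xs.length)
    (hbefore : ∀ j : Nat, j < r → ∀ hj : j < xs.length, p xs[j] = false)
    (hhit : p xs[r] = true) : xs.find? p = some xs[r] := by
  induction xs generalizing r with
  | nil => simp at hr
  | cons x xs ih =>
    cases r with
    | zero => simp_all [List.find?]
    | succ r =>
      have h0 : p x = false := hbefore 0 (Nat.succ_pos r) (by simp)
      simp only [List.find?, h0]
      exact ih r (by simpa using hr) (fun j hj hj2 => by
        have := hbefore (j + 1) (by omega) (by simpa using hj2); simpa using this)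
        (by simpa using hhit)

-- the built dict maps c to its (offset) position list
theorem pvBuildPos_get (xs : List Char) (i : Int) (d : PySem.Dict Char (List Int)) (c : Char) :
    (pvBuildPos xs i d).get? c =
      match d.get? c with
      | some ps => some (ps ++ pvOcc c xs i)
      | none => if pvOcc c xs i = [] then none else some (pvOcc c xs i) := by
  induction xs generalizing i d with
  | nil => simp [pvBuildPos, pvOcc]; cases d.get? c <;> simp
  | cons x xs ih =>
    simp only [pvBuildPos]
    by_cases hx : x = c
    · subst hx
      cases hdc : d.get? x with
      | some ps =>
        simp only [ih]
        rw [PySem.Dict.get?_insert_self]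
        simp [pvOcc]
      | none =>
        simp only [ih]
        rw [PySem.Dict.get?_insert_self]
        simp [pvOcc]
    · have hcx : c ≠ x := fun h => hx h.symm
      cases hdx : d.get? x with
      | some ps =>
        simp only [ih]
        have h2 := PySem.Dict.get?_insert_of_ne (d := d) (v := ps ++ [i]) hcx
        rw [h2]
        simp [pvOcc, hx]
      | none =>
        simp only [ih]
        have h2 := PySem.Dict.get?_insert_of_ne (d := d) (v := [i]) hcx
        rw [h2]
        simp [pvOcc, hx]

-- binary-search invariant
theorem pvBisect_spec (ps : List Int) (index : Int)
    (hmono : ps.Pairwise (· < ·)) :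
    ∀ (lo hi : Int), 0 ≤ lo → lo ≤ hi → hi ≤ ps.length →
    (∀ j : Nat, (j : Int) < lo → ∀ hj : j < ps.length, ps[j] ≤ index) →
    (∀ j : Nat, hi ≤ (j : Int) → ∀ hj : j < ps.length, index < ps[j]) →
    ∃ r : Nat, pvBisect ps index lo hi = r ∧ lo ≤ (r : Int) ∧ (r : Int) ≤ hi ∧
      (∀ j : Nat, j < r → ∀ hj : j < ps.length, ps[j] ≤ index) ∧
      (∀ j : Nat, r ≤ j → ∀ hj : j < ps.length, index < ps[j]) := by
  have main : ∀ (n : Nat) (lo hi : Int), (hi - lo).toNat ≤ n → 0 ≤ lo → lo ≤ hi → hi ≤ ps.length →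
      (∀ j : Nat, (j : Int) < lo → ∀ hj : j < ps.length, ps[j] ≤ index) →
      (∀ j : Nat, hi ≤ (j : Int) → ∀ hj : j < ps.length, index < ps[j]) →
      ∃ r : Nat, pvBisect ps index lo hi = r ∧ lo ≤ (r : Int) ∧ (r : Int) ≤ hi ∧
        (∀ j : Nat, j < r → ∀ hj : j < ps.length, ps[j] ≤ index) ∧
        (∀ j : Nat, r ≤ j → ∀ hj : j < ps.length, index < ps[j]) := by
    intro n
    induction n with
    | zero =>
      intro lo hi hfuel hlo hlh hhi hbef haft
      have heq : ¬ lo < hi := by omega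
      refine ⟨lo.toNat, ?_, by omega, by omega, ?_, ?_⟩
      · rw [pvBisect]; simp [heq, Int.toNat_of_nonneg hlo]
      · intro j hj hj2; exact hbef j (by omega) hj2
      · intro j hj hj2; exact haft j (by omega) hj2
    | succ n ih =>
      intro lo hi hfuel hlo hlh hhi hbef haft
      by_cases hlt : lo < hi
      · have hmid : PySem.Int.floordiv (lo + hi) 2 = (lo + hi) / 2 :=
          PySem.Int.floordiv_eq_ediv_of_pos (by norm_num)
        have hm0 : 0 ≤ PySem.Int.floordiv (lo + hi) 2 := by rw [hmid]; omega
        obtain ⟨m, hm⟩ : ∃ m : Nat, PySem.Int.floordiv (lo + hi) 2 = (m : Int) :=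
          ⟨_, (Int.toNat_of_nonneg hm0).symm⟩
        have hb1 : lo ≤ (m : Int) := by rw [← hm, hmid]; omega
        have hb2 : (m : Int) < hi := by rw [← hm, hmid]; omega
        have hmlen : m < ps.length := by omega
        have hval : (PySem.List.pyGet? ps (m : Int)).getD 0 = ps[m] := by
          simp [List.getElem?_eq_getElem hmlen]
        have hstep : pvBisect ps index lo hi =
            if index < ps[m] then pvBisect ps index lo (m : Int)
            else pvBisect ps index ((m : Int) + 1) hi := by
          rw [pvBisect]; simp only [hlt, dite_true, hm, hval]
        have hget := List.pairwise_iff_getElem.mp hmono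
        by_cases hcmp : index < ps[m]
        · have haft' : ∀ j : Nat, (m : Int) ≤ (j : Int) → ∀ hj : j < ps.length, index < ps[j] := by
            intro j hj hj2
            rcases Nat.lt_or_ge m j with h | h
            · exact lt_of_lt_of_le hcmp (le_of_lt (hget m j hmlen hj2 h))
            · have : j = m := by omega
              subst this; exact hcmp
          obtain ⟨r, hr, h1, h2, h3, h4⟩ := ih lo (m : Int) (by omega) hlo (by omega) (by omega) hbef haft'
          refine ⟨r, ?_, h1, by omega, h3, h4⟩
          rw [hstep, if_pos hcmp]; exact hr
        · have hbef' : ∀ j : Nat, (j : Int) < (m : Int) + 1 → ∀ hj : j < ps.length, ps[j] ≤ index := by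
            intro j hj hj2
            rcases Nat.lt_or_ge j m with h | h
            · exact le_of_lt (lt_of_lt_of_le (hget j m hj2 hmlen h) (by omega))
            · have : j = m := by omega
              subst this; omega
          obtain ⟨r, hr, h1, h2, h3, h4⟩ := ih ((m : Int) + 1) hi (by omega) (by omega) (by omega) hhi hbef' haft
          refine ⟨r, ?_, by omega, h2, h3, h4⟩
          rw [hstep, if_neg hcmp]; exact hr
      · refine ⟨lo.toNat, ?_, by omega, by omega, ?_, ?_⟩
        · rw [pvBisect]; simp [hlt, Int.toNat_of_nonneg hlo]
        · intro j hj hj2; exact hbef j (by omega) hj2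
        · intro j hj hj2; exact haft j (by omega) hj2
  intro lo hi hlo hlh hhi hbef haft
  exact main (hi - lo).toNat lo hi le_rfl hlo hlh hhi hbef haft

-- one synchronized step + induction over shortStr
theorem pvLoop_eq (l : List Char) (t : Int) :
    ∀ (ss : List Char) (index ans : Int),
      (index = -1 ∨ (0 ≤ index ∧ index < l.length)) →
      pvALoop l t ss index ans =
        pvBLoop (pvBuildPos l 0 PySem.Dict.empty) t ss index ans := by
  intro ss
  induction ss with
  | nil => intro index ans _; rfl
  | cons c rest ih =>
    intro index ans hinv
    by_cases hbreak : 0 < t ∧ t ≤ ans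
    · simp [pvALoop, pvBLoop, hbreak]
    · have hd : (pvBuildPos l 0 PySem.Dict.empty).get? c =
          if pvOcc c l 0 = [] then none else some (pvOcc c l 0) := by
        rw [pvBuildPos_get]; simp
      have hA : pvAFind c (index + 1) (l ++ l) 0 =
          ((pvOcc c l 0 ++ (pvOcc c l 0).map (· + (l.length : Int))).find?
            (fun p => decide (index + 1 ≤ p))).getD (-1) := by
        rw [pvAFind_eq, pvOcc_append, pvOcc_shift]
      have hBnd : ∀ p ∈ pvOcc c l 0, 0 ≤ p ∧ p < (l.length : Int) := by
        intro p hp; have := pvOcc_bounds c l 0 p hp; omega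

      by_cases hL : pvOcc c l 0 = []
      · simp [pvALoop, pvBLoop, hbreak, hA, hL, hd]
      · set L := pvOcc c l 0 with hLdef
        have hsome : (pvBuildPos l 0 PySem.Dict.empty).get? c = some L := by
          rw [hd, if_neg hL]
        obtain ⟨r, hr, hr0, hrlen, hbef, haft⟩ :=
          pvBisect_spec L index (pvOcc_sorted c l 0) 0 (L.length) le_rfl
            (Int.natCast_nonneg _) le_rfl
            (fun j hj _ => absurd hj (by omega))
            (fun j hj hj2 => absurd hj (by omega))
        have hrlen' : r ≤ L.length := by exact_mod_cast hrlen
        have hidx : index < (l.length : Int) := by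
          rcases hinv with h | h
          · rcases List.exists_cons_of_ne_nil hL with ⟨x, xs', hcons⟩
            have := hBnd x (by rw [hcons]; simp)
            omega
          · omega
        by_cases hcase : r = L.length
        · -- wrap-around step
          rcases List.exists_cons_of_ne_nil hL with ⟨x, xs', hcons⟩
          have hx : x ∈ L := by rw [hcons]; simp
          have hxb := hBnd x hx
          have hfind1 : L.find? (fun p => decide (index + 1 ≤ p)) = none := by
            rw [List.find?_eq_none]
            intro p hp
            obtain ⟨j, hj, hjp⟩ := List.mem_iff_getElem.mp hp
            have := hbef j (by omega) hj
            simp [← hjp]; omega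
          have hfind2 : (L.map (· + (l.length : Int))).find? (fun p => decide (index + 1 ≤ p)) =
              some (x + (l.length : Int)) := by
            rw [find?_all]
            · rw [hcons]; rfl
            · intro y hy
              obtain ⟨q, hq, hqy⟩ := List.mem_map.mp hy
              have := hBnd q hq
              simp [← hqy]; omega
          have hcomb : ((L ++ L.map (· + (l.length : Int))).find?
              (fun p => decide (index + 1 ≤ p))) = some (x + (l.length : Int)) := by
            rw [List.find?_append, hfind1, hfind2]; rfl
          have hAstep : pvALoop l t (c :: rest) index ans =
              pvALoop l t rest x (ans + 1) := by
            simp only [pvALoop, if_neg hbreak, hA, hcomb, Option.getD_some]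
            have h1 : ¬ (x + (l.length : Int) = -1) := by omega
            have h2 : (l.length : Int) ≤ x + (l.length : Int) := by omega
            have h3 : x + (l.length : Int) - (l.length : Int) = x := by ring
            simp [h1, h2, h3]
          have hBstep : pvBLoop (pvBuildPos l 0 PySem.Dict.empty) t (c :: rest) index ans =
              pvBLoop (pvBuildPos l 0 PySem.Dict.empty) t rest x (ans + 1) := by
            simp only [pvBLoop, if_neg hbreak, hsome]
            rw [hr, hcase]
            have hget0 : (PySem.List.pyGet? L (0 : Int)).getD 0 = x := by
              rw [hcons, show ((0 : Int)) = ((0 : Nat) : Int) from rfl,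
                PySem.List.pyGet?_natCast]
              rfl
            simp [hget0]
          rw [hAstep, hBstep]
          exact ih x (ans + 1) (Or.inr ⟨hxb.1, hxb.2⟩)
        · -- in-place step
          have hrlt : r < L.length := by omega
          have hxb := hBnd L[r] (List.getElem_mem hrlt)
          have hfind1 : L.find? (fun p => decide (index + 1 ≤ p)) = some L[r] := by
            apply find?_eq_getElem _ _ r hrlt
            · intro j hj hj2
              have := hbef j hj hj2
              simp; omega
            · have := haft r le_rfl hrlt
              simp; omega
          have hcomb : ((L ++ L.map (· + (l.length : Int))).find?
              (fun p => decide (index + 1 ≤ p))) = some L[r] := by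
            rw [List.find?_append, hfind1]; rfl
          have hAstep : pvALoop l t (c :: rest) index ans =
              pvALoop l t rest L[r] ans := by
            simp only [pvALoop, if_neg hbreak, hA, hcomb, Option.getD_some]
            have h1 : ¬ (L[r] = -1) := by omega
            have h2 : ¬ ((l.length : Int) ≤ L[r]) := by omega
            simp [h1, h2]
          have hBstep : pvBLoop (pvBuildPos l 0 PySem.Dict.empty) t (c :: rest) index ans =
              pvBLoop (pvBuildPos l 0 PySem.Dict.empty) t rest L[r] ans := by
            simp only [pvBLoop, if_neg hbreak, hsome]
            rw [hr]
            have hne : ¬ ((r : Int) = (L.length : Int)) := by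
              omega
            simp [hne, List.getElem?_eq_getElem hrlt]
          rw [hAstep, hBstep]
          exact ih L[r] ans (Or.inr ⟨hxb.1, hxb.2⟩)

-- ===== VERDICT (by name: the statement is the Claim_ definition above) =====
theorem getLongstrLoopLeastTimesToContainsShortstr_spec : Claim_equal_getLongstrLoopLeastTimesToContainsShortstr := by
  intro longStr shortStr t _
  unfold Spec_getLongstrLoopLeastTimesToContainsShortstr
  unfold getLongstrLoopLeastTimesToContainsShortstr getLongstrLoopLeastTimesToContainsShortstr_alt
  exact pvLoop_eq longStr.toList t shortStr.toList (-1) 1 (Or.inl rfl)
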